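-- pv_equiv track=rewrite | github.com/spamela/Nektar | convert_eqdsk2gmsh.py | reduce_surface_size
-- ===== SOURCE A (Python) =====
-- def reduce_surface_size(n_surf, R_surf, Z_surf, n_max):
--     # we just reduce surface resolution by two until < n_max
--     n_old = n_surf
--     R_old = R_surf
--     Z_old = Z_surf
--     n_surf_reduced = n_max + 1
--     while (n_surf_reduced > n_max):
--         count = 0
--         R_surf_new = []
--         Z_surf_new = []
--         for i in range(n_old):
--             if (i%2 == 0):
--                 count = count + 1
--                 R_surf_new.append(R_old[i])
--                 Z_surf_new.append(Z_old[i])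
--         n_surf_reduced = count
--         n_old = count
--         R_old = R_surf_new
--         Z_old = Z_surf_new
--     return n_surf_reduced, R_surf_new, Z_surf_new
-- ===== SOURCE B (Python) =====
-- def reduce_surface_size(n_surf, R_surf, Z_surf, n_max):
--     # Halve the count arithmetically until it is <= n_max (always at least once),
--     # then take every stride-th point directly from the original arrays.
--     n = n_surf if n_surf > 0 else 0
--     stride = 2
--     n_new = (n + 1) // 2
--     while n_new > n_max:
--         stride *= 2
--         n_new = (n_new + 1) // 2
--     R_new = [R_surf[i] for i in range(0, n, stride)]
--     Z_new = [Z_surf[i] for i in range(0, n, stride)]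
--     return n_new, R_new, Z_new
-- ===== Notes on version B (the rewrite author's own statement) =====
-- stated objective: alternative
-- what changed: Instead of materialising the halved R/Z lists on every pass, B halves only the integer count until it is <= n_max (tracking the stride 2^k) and then builds the result lists once by striding the original arrays.
import Mathlib
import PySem

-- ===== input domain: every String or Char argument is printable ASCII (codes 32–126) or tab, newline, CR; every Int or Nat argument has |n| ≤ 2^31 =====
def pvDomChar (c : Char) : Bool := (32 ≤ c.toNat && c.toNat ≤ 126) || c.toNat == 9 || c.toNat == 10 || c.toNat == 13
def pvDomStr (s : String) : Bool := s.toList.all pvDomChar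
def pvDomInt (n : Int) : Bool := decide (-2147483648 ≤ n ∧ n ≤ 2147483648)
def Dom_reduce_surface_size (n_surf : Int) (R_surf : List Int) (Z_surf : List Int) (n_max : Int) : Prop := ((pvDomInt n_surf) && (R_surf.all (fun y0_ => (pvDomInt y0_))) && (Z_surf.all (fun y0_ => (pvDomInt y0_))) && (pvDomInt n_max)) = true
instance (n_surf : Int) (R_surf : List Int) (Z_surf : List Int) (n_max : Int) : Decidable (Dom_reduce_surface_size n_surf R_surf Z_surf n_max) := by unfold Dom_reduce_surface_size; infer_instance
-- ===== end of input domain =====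

-- B halves only the integer count (tracking the stride 2^k) and builds the result
-- lists once by striding the originals, instead of rebuilding both lists each pass.


-- ===== PORT A =====
-- the inner 'for i in range(n_old)' loop of A (count / R_surf_new / Z_surf_new);
-- R_old[i] is ported as pyGetD (total); Pre_ excludes exactly the inputs where Python raises
def reduce_inner (R_old Z_old : List Int) (n_old : Int) : Int × List Int × List Int :=
  (PySem.List.pyRange 0 n_old 1).foldl
    (fun (st : Int × List Int × List Int) i =>
      if PySem.Int.mod i 2 == 0 then
        (st.1 + 1, st.2.1 ++ [PySem.List.pyGetD R_old i 0], st.2.2 ++ [PySem.List.pyGetD Z_old i 0])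
      else st)
    (0, [], [])

-- A's outer 'while' loop; the fuel argument only totalises it (Pre_ excludes the
-- inputs on which the Python while-loop never terminates, and there fuel suffices)
def reduce_loop (n_max : Int) : Nat → Int → List Int → List Int → Int × List Int × List Int
  | 0, n_old, R_old, Z_old => (n_old, R_old, Z_old)
  | fuel + 1, n_old, R_old, Z_old =>
    let st := reduce_inner R_old Z_old n_old
    if st.1 > n_max then reduce_loop n_max fuel st.1 st.2.1 st.2.2 else st

def reduce_surface_size (n_surf : Int) (R_surf : List Int) (Z_surf : List Int) (n_max : Int) : Int × List Int × List Int :=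
  reduce_loop n_max (n_surf.toNat + 2) n_surf R_surf Z_surf

-- ===== PORT B =====
-- B's 'while n_new > n_max' loop over (stride, n_new); fuel only totalises it
def reduce_alt_loop (n_max : Int) : Nat → Int → Int → Int × Int
  | 0, stride, n_new => (stride, n_new)
  | fuel + 1, stride, n_new =>
    if n_new > n_max then reduce_alt_loop n_max fuel (stride * 2) (PySem.Int.floordiv (n_new + 1) 2)
    else (stride, n_new)

def reduce_surface_size_alt (n_surf : Int) (R_surf : List Int) (Z_surf : List Int) (n_max : Int) : Int × List Int × List Int :=
  let n := if n_surf > 0 then n_surf else 0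
  let p := reduce_alt_loop n_max (n_surf.toNat + 1) 2 (PySem.Int.floordiv (n + 1) 2)
  (p.2,
   (PySem.List.pyRange 0 n p.1).map (fun i => PySem.List.pyGetD R_surf i 0),
   (PySem.List.pyRange 0 n p.1).map (fun i => PySem.List.pyGetD Z_surf i 0))

-- ===== PRECONDITION & SPEC =====
-- Pre_ is exactly where Python A returns: the first pass must index only inside
-- R_surf/Z_surf (even indices below n_surf; IndexError otherwise), and the while
-- loop must terminate (counts reach 1, whence it needs 1 ≤ n_max, or 0 with n_surf ≤ 0).
def Pre_reduce_surface_size (n_surf : Int) (R_surf : List Int) (Z_surf : List Int) (n_max : Int) : Prop :=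
  (n_surf ≤ (R_surf.length : Int) ∨ (n_surf = (R_surf.length : Int) + 1 ∧ n_surf % 2 = 0)) ∧
  (n_surf ≤ (Z_surf.length : Int) ∨ (n_surf = (Z_surf.length : Int) + 1 ∧ n_surf % 2 = 0)) ∧
  (1 ≤ n_max ∨ (n_surf ≤ 0 ∧ 0 ≤ n_max))
instance (n_surf : Int) (R_surf : List Int) (Z_surf : List Int) (n_max : Int) : Decidable (Pre_reduce_surface_size n_surf R_surf Z_surf n_max) := by unfold Pre_reduce_surface_size; infer_instance

def pvWitness_reduce_surface_size : Int × List Int × List Int × Int := (6, [1, 2, 3, 4, 5, 6], [7, 8, 9, 10, 11, 12], 2)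

def Spec_reduce_surface_size (n_surf : Int) (R_surf : List Int) (Z_surf : List Int) (n_max : Int) (out : Int × List Int × List Int) : Prop := out = reduce_surface_size_alt n_surf R_surf Z_surf n_max
instance (n_surf : Int) (R_surf : List Int) (Z_surf : List Int) (n_max : Int) (out : Int × List Int × List Int) : Decidable (Spec_reduce_surface_size n_surf R_surf Z_surf n_max out) := by unfold Spec_reduce_surface_size; infer_instance

-- ===== CLAIM (what is proved, stated in full; the proofs are below) =====
def Claim_equal_reduce_surface_size : Prop := ∀ (n_surf : Int) (R_surf : List Int) (Z_surf : List Int) (n_max : Int), Dom_reduce_surface_size n_surf R_surf Z_surf n_max → Pre_reduce_surface_size n_surf R_surf Z_surf n_max → Spec_reduce_surface_size n_surf R_surf Z_surf n_max (reduce_surface_size n_surf R_surf Z_surf n_max)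

-- ===== LEMMAS AND PROOFS =====

-- ceiling division on Nat
def cdN (n s : Nat) : Nat := (n + s - 1) / s

-- every s-th element of L below index n (via total getD, matching the ports' pyGetD)
def selN (s n : Nat) (L : List Int) : List Int :=
  (List.range (cdN n s)).map (fun k => L.getD (s * k) 0)

theorem cdN_eq {n s : Nat} (hn : 1 ≤ n) (hs : 1 ≤ s) : cdN n s = (n - 1) / s + 1 := by
  unfold cdN
  have h : n + s - 1 = (n - 1) + s := by omega
  rw [h, Nat.add_div_right _ (by omega)]

theorem cdN_cdN (n : Nat) {s t : Nat} (hs : 1 ≤ s) (ht : 1 ≤ t) :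
    cdN (cdN n s) t = cdN n (s * t) := by
  have hst : 1 ≤ s * t := Nat.mul_pos hs ht
  rcases Nat.eq_zero_or_pos n with hn | hn
  · subst hn
    have h0 : cdN 0 s = 0 := by unfold cdN; exact Nat.div_eq_of_lt (by omega)
    have h1 : cdN 0 t = 0 := by unfold cdN; exact Nat.div_eq_of_lt (by omega)
    have h2 : cdN 0 (s * t) = 0 := by unfold cdN; exact Nat.div_eq_of_lt (by omega)
    rw [h0, h1, h2]
  · have hA : cdN n s = (n - 1) / s + 1 := cdN_eq hn hs
    have hB := cdN_eq (n := (n - 1) / s + 1) (s := t) (Nat.le_add_left 1 _) ht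
    rw [Nat.add_sub_cancel] at hB
    rw [hA, hB, Nat.div_div_eq_div_mul, ← Nat.add_sub_cancel (n := (n-1)/(s*t) + 1) (m := 1)]
    · rw [Nat.add_sub_cancel, ← cdN_eq hn hst]

theorem arith_half (c : Nat) : PySem.Int.floordiv ((c : Int) + 1) 2 = ((cdN c 2 : Nat) : Int) := by
  rw [PySem.Int.floordiv_eq_ediv_of_pos (by norm_num)]
  unfold cdN
  omega

-- the inner for-loop, on a nonnegative cast bound
theorem inner_eq_nat (R Z : List Int) (m : Nat) :
    reduce_inner R Z (m : Int) = (((cdN m 2 : Nat) : Int), selN 2 m R, selN 2 m Z) := by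
  induction m with
  | zero =>
    simp [reduce_inner, selN, cdN, PySem.List.pyRange_one_eq_nil]
  | succ m ih =>
    unfold reduce_inner at ih ⊢
    have hstep : PySem.List.pyRange 0 ((m : Int) + 1) 1
        = PySem.List.pyRange 0 (m : Int) 1 ++ [(m : Int)] :=
      PySem.List.pyRange_one_succ_right (by positivity)
    push_cast
    rw [hstep, List.foldl_append, ih]
    simp only [List.foldl_cons, List.foldl_nil]
    have hmod : PySem.Int.mod ((m : Nat) : Int) 2 = ((m % 2 : Nat) : Int) := by
      rw [PySem.Int.mod_eq_emod_of_pos (by norm_num)]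
      omega
    rw [hmod]
    rcases Nat.even_or_odd m with he | ho
    · have hm2 : m % 2 = 0 := Nat.even_iff.mp he
      have hcd : cdN (m + 1) 2 = cdN m 2 + 1 := by unfold cdN; omega
      have hsel : ∀ L : List Int, selN 2 (m + 1) L = selN 2 m L ++ [L.getD m 0] := by
        intro L
        unfold selN
        rw [hcd, List.range_succ, List.map_append]
        have h2m : 2 * cdN m 2 = m := by unfold cdN; omega
        simp [h2m]
      rw [hm2, hcd, hsel R, hsel Z]
      simp [PySem.List.pyGetD_natCast]
    · have hm2 : m % 2 = 1 := Nat.odd_iff.mp ho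
      have hcd : cdN (m + 1) 2 = cdN m 2 := by unfold cdN; omega
      have hsel : ∀ L : List Int, selN 2 (m + 1) L = selN 2 m L := by
        intro L
        unfold selN
        rw [hcd]
      rw [hm2, hcd, hsel R, hsel Z]
      simp

-- the inner for-loop on an arbitrary Int bound (negative bound = empty range)
theorem inner_eq (R Z : List Int) (c : Int) :
    reduce_inner R Z c = (((cdN c.toNat 2 : Nat) : Int), selN 2 c.toNat R, selN 2 c.toNat Z) := by
  rcases (by omega : 0 ≤ c ∨ c < 0) with h | h
  · have h' := inner_eq_nat R Z c.toNat
    rwa [Int.toNat_of_nonneg h] at h'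
  · have h0 : c.toNat = 0 := Int.toNat_of_nonpos (le_of_lt h)
    rw [h0]
    have hr : PySem.List.pyRange 0 c 1 = [] := PySem.List.pyRange_one_eq_nil (le_of_lt h)
    simp [reduce_inner, hr, selN, cdN]

-- one iteration of A's while loop, through inner_eq
theorem loopA_step (n_max : Int) (f : Nat) (c : Int) (R Z : List Int) :
    reduce_loop n_max (f + 1) c R Z =
      (if ((cdN c.toNat 2 : Nat) : Int) > n_max
       then reduce_loop n_max f ((cdN c.toNat 2 : Nat) : Int) (selN 2 c.toNat R) (selN 2 c.toNat Z)
       else (((cdN c.toNat 2 : Nat) : Int), selN 2 c.toNat R, selN 2 c.toNat Z)) := by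
  show (let st := reduce_inner R Z c;
    if st.1 > n_max then reduce_loop n_max f st.1 st.2.1 st.2.2 else st) = _
  rw [inner_eq]

theorem loopB_step (n_max : Int) (f : Nat) (stride c : Int) :
    reduce_alt_loop n_max (f + 1) stride c =
      (if c > n_max then reduce_alt_loop n_max f (stride * 2) (PySem.Int.floordiv (c + 1) 2)
       else (stride, c)) := rfl

-- composing two selections: every 2nd of every s-th = every (2s)-th
theorem selN_comp (s n : Nat) (hs : 1 ≤ s) (L : List Int) :
    selN 2 (cdN n s) (selN s n L) = selN (2 * s) n L := by
  unfold selN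
  rw [cdN_cdN n hs (by norm_num), Nat.mul_comm s 2]
  apply List.map_congr_left
  intro k hk
  rw [List.mem_range] at hk
  have hlt : 2 * k < cdN n s := by
    have h2 : cdN (cdN n s) 2 = cdN n (2 * s) := by
      rw [cdN_cdN n hs (by norm_num), Nat.mul_comm s 2]
    have hk' : k < cdN (cdN n s) 2 := by rw [h2]; exact hk
    unfold cdN at hk' ⊢
    omega
  rw [List.getD_eq_getElem?_getD, List.getElem?_map, List.getElem?_range hlt]
  have : s * (2 * k) = 2 * s * k := by ring
  simp [this]

-- B's final comprehension over range(0, n, stride) is selN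
theorem sel_bridge (σ n0 : Nat) (hσ : 1 ≤ σ) (L : List Int) :
    (PySem.List.pyRange 0 (n0 : Int) (σ : Int)).map (fun i => PySem.List.pyGetD L i 0)
      = selN σ n0 L := by
  rw [PySem.List.pyRange_of_pos 0 (n0 : Int) (by exact_mod_cast hσ)]
  unfold selN
  have hbound : (if (0 : Int) < (n0 : Int)
      then (((n0 : Int) - 0 + (σ : Int) - 1) / (σ : Int)).toNat else 0) = cdN n0 σ := by
    split_ifs with h
    · unfold cdN
      have he : ((n0 : Int) - 0 + (σ : Int) - 1) = ((n0 + σ - 1 : Nat) : Int) := by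
        omega
      rw [he, ← Int.natCast_div, Int.toNat_natCast]
    · have hz : n0 = 0 := by omega
      subst hz
      unfold cdN
      exact (Nat.div_eq_of_lt (by omega)).symm
  rw [hbound, List.map_map]
  apply List.map_congr_left
  intro k _
  have he : (0 : Int) + (σ : Int) * (k : Int) = ((σ * k : Nat) : Int) := by push_cast; ring
  simp only [Function.comp, he, PySem.List.pyGetD_natCast]

-- main correspondence between A's while loop and B's count-only while loop
theorem loop_corr (n_max : Int) (n0 : Nat) (R0 Z0 : List Int) :
    ∀ (f s : Nat), 1 ≤ s →
      ∃ t : Nat, 1 ≤ t ∧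
        reduce_alt_loop n_max f (((2 * s : Nat) : Int)) (((cdN n0 (2 * s) : Nat) : Int))
          = (((2 * t : Nat) : Int), ((cdN n0 (2 * t) : Nat) : Int)) ∧
        reduce_loop n_max (f + 1) (((cdN n0 s : Nat) : Int)) (selN s n0 R0) (selN s n0 Z0)
          = (((cdN n0 (2 * t) : Nat) : Int), selN (2 * t) n0 R0, selN (2 * t) n0 Z0) := by
  intro f
  induction f with
  | zero =>
    intro s hs
    refine ⟨s, hs, rfl, ?_⟩
    rw [loopA_step, Int.toNat_natCast, selN_comp s n0 hs R0, selN_comp s n0 hs Z0,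
      cdN_cdN n0 hs (by norm_num), Nat.mul_comm s 2]
    split_ifs <;> rfl
  | succ f ih =>
    intro s hs
    by_cases hc : ((cdN n0 (2 * s) : Nat) : Int) > n_max
    · obtain ⟨t, ht, hB, hA⟩ := ih (2 * s) (by omega)
      refine ⟨t, ht, ?_, ?_⟩
      · rw [loopB_step, if_pos hc, arith_half, cdN_cdN n0 (by omega) (by norm_num)]
        have h1 : ((2 * s : Nat) : Int) * 2 = ((2 * (2 * s) : Nat) : Int) := by push_cast; ring
        have h2 : 2 * s * 2 = 2 * (2 * s) := by ring
        rw [h1, h2, hB]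
      · rw [loopA_step, Int.toNat_natCast, selN_comp s n0 hs R0, selN_comp s n0 hs Z0,
          cdN_cdN n0 hs (by norm_num), Nat.mul_comm s 2, if_pos hc]
        exact hA
    · refine ⟨s, hs, ?_, ?_⟩
      · rw [loopB_step, if_neg hc]
      · rw [loopA_step, Int.toNat_natCast, selN_comp s n0 hs R0, selN_comp s n0 hs Z0,
          cdN_cdN n0 hs (by norm_num), Nat.mul_comm s 2, if_neg hc]

-- the two ports agree on every input (the claim's content, Pre_ aside)
theorem ports_agree (n_surf : Int) (R_surf Z_surf : List Int) (n_max : Int) :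
    reduce_surface_size n_surf R_surf Z_surf n_max
      = reduce_surface_size_alt n_surf R_surf Z_surf n_max := by
  obtain ⟨n0, hn0⟩ : ∃ n0 : Nat, n_surf.toNat = n0 := ⟨_, rfl⟩
  have hn : (if n_surf > 0 then n_surf else 0) = (n0 : Int) := by
    split_ifs <;> omega
  have hBeq : reduce_surface_size_alt n_surf R_surf Z_surf n_max
      = ((reduce_alt_loop n_max (n0 + 1) 2 ((cdN n0 2 : Nat) : Int)).2,
         (PySem.List.pyRange 0 (n0 : Int)
             (reduce_alt_loop n_max (n0 + 1) 2 ((cdN n0 2 : Nat) : Int)).1).map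
           (fun i => PySem.List.pyGetD R_surf i 0),
         (PySem.List.pyRange 0 (n0 : Int)
             (reduce_alt_loop n_max (n0 + 1) 2 ((cdN n0 2 : Nat) : Int)).1).map
           (fun i => PySem.List.pyGetD Z_surf i 0)) := by
    unfold reduce_surface_size_alt
    simp only [hn, hn0, arith_half]
  have hAeq : reduce_surface_size n_surf R_surf Z_surf n_max
      = (if ((cdN n0 2 : Nat) : Int) > n_max
         then reduce_loop n_max (n0 + 1) ((cdN n0 2 : Nat) : Int)
           (selN 2 n0 R_surf) (selN 2 n0 Z_surf)
         else (((cdN n0 2 : Nat) : Int), selN 2 n0 R_surf, selN 2 n0 Z_surf)) := by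
    unfold reduce_surface_size
    rw [show n_surf.toNat + 2 = (n0 + 1) + 1 by omega, loopA_step, hn0]
  rw [hAeq, hBeq]
  have hB1 : reduce_alt_loop n_max (n0 + 1) 2 ((cdN n0 2 : Nat) : Int)
      = (if ((cdN n0 2 : Nat) : Int) > n_max
         then reduce_alt_loop n_max n0 ((2 * 2 : Nat) : Int) ((cdN n0 (2 * 2) : Nat) : Int)
         else (2, ((cdN n0 2 : Nat) : Int))) := by
    rw [loopB_step, arith_half, cdN_cdN n0 (by norm_num) (by norm_num)]
    norm_num
  obtain ⟨t, ht, hBl, hAl⟩ := loop_corr n_max n0 R_surf Z_surf n0 2 (by norm_num)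
  by_cases hc : ((cdN n0 2 : Nat) : Int) > n_max
  · rw [if_pos hc, hAl, hB1, if_pos hc, hBl,
      sel_bridge (2 * t) n0 (by omega) R_surf, sel_bridge (2 * t) n0 (by omega) Z_surf]
  · rw [if_neg hc, hB1, if_neg hc]
    have h2 : (2 : Int) = ((2 : Nat) : Int) := by norm_num
    rw [h2, sel_bridge 2 n0 (by norm_num) R_surf, sel_bridge 2 n0 (by norm_num) Z_surf]

-- ===== VERDICT (by name: the statement is the Claim_ definition above) =====
theorem reduce_surface_size_spec : Claim_equal_reduce_surface_size := by
  intro n_surf R_surf Z_surf n_max _ _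
  exact ports_agree n_surf R_surf Z_surf n_max
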